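-- pv_equiv track=rewrite | github.com/jonathaneunice/hjoin | hjoin/hjoin.py | hjoin
-- ===== SOURCE A (Python) =====
-- def string_shape(s):
--     """
--     Return the height, width of a string, in lines/scharacters.
--     h,w order chosen to be compatible with rows, columns standard of
--     NumPy and and its shape method.
--     """
--     lines = s.splitlines()
--     lengths = [len(l) for l in lines]
--     return (len(lengths), max(lengths or [0]))
--
-- def hjoin(strings, sep=' '):
--     """
--     Horizontal join. Concatenates strings horizontally. Like
--     join, but considers nth line of each string to be another column
--     and concatenates it appropriately.
--     """
--     if not strings:
--         return ''
--     ncols = len(strings)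
--     slines = [s.splitlines() for s in strings]
--     shapes = [string_shape(s) for s in strings]
--     heights, widths = zip(*shapes)
--     height = max(heights)
--     lines = []
--     for row_index in range(height):
--         row = []
--         for col_index in range(ncols):
--             col_lines = slines[col_index]
--             if row_index < heights[col_index]:
--                 cell = col_lines[row_index]
--             else:
--                 cell = ''
--             celljust = cell.ljust(widths[col_index])
--             row.append(celljust)
--         lines.append(sep.join(row))
--     return '\n'.join(lines)
-- ===== SOURCE B (Python) =====
-- def hjoin(strings, sep=' '):
--     """Horizontal join by incremental pairwise merging: fold over the
--     blocks, appending each block's cell onto every accumulated row (rows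
--     kept as cell lists), carrying the blank-filler cells for rows that
--     appear later; join once at the end."""
--     if not strings:
--         return ''
--
--     def block(s):
--         ls = s.splitlines()
--         w = max(map(len, ls), default=0)
--         return [l.ljust(w) for l in ls], ' ' * w
--
--     first, b0 = block(strings[0])
--     rows = [[l] for l in first]
--     blanks = [b0]
--     for s in strings[1:]:
--         ls, b = block(s)
--         for i, r in enumerate(rows):
--             r.append(ls[i] if i < len(ls) else b)
--         for i in range(len(rows), len(ls)):
--             rows.append(blanks + [ls[i]])
--         blanks.append(b)
--     return '\n'.join(sep.join(r) for r in rows)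
-- ===== Notes on version B (the rewrite author's own statement) =====
-- stated objective: alternative
-- what changed: B is an incremental left fold that glues one block at a time onto the accumulated result (appending each block's cell to every accumulated row, kept as cell lists, and carrying the blank-filler cells for rows that appear later), instead of A's global two-level loop over all row indices and all column indices of a precomputed shape table.
import Mathlib
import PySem

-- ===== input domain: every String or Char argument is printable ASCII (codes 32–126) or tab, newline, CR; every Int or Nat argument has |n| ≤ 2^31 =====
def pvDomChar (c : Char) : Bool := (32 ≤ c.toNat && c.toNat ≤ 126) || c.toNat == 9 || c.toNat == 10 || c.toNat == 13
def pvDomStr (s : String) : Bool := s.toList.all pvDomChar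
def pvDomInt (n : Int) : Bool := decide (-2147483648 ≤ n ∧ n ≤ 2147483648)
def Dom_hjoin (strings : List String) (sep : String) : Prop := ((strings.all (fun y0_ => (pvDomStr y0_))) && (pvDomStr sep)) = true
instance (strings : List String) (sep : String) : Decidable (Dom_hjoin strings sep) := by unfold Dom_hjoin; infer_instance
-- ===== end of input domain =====

-- B replaces A's global rows×columns loop by an incremental left fold that glues one padded block at a time onto the joined result; alternative decomposition, similar cost.

-- ===== PORT A =====
-- cell.ljust(w): pad on the right with spaces to width w
def pvLjust (cs : List Char) (w : Nat) : List Char := cs ++ List.replicate (w - cs.length) ' '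

-- string_shape: (number of lines, max line length); max(lengths or [0]) = foldl max 0 (lengths are Nats)
def string_shape (s : String) : Nat × Nat :=
  let lines := PySem.Str.splitlines s
  let lengths := lines.map (fun l => l.toList.length)
  (lengths.length, lengths.foldl max 0)

def hjoin (strings : List String) (sep : String) : String :=
  if strings = [] then "" else
  let ncols := strings.length
  let slines := strings.map (fun s => (PySem.Str.splitlines s).map String.toList)
  let shapes := strings.map string_shape
  let heights := shapes.map (·.1)
  let widths := shapes.map (·.2)
  -- max(heights) over the nonempty Nat list heights = foldl max 0
  let height := heights.foldl max 0
  let lines := (List.range height).map (fun row_index =>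
    PySem.Chars.join sep.toList ((List.range ncols).map (fun col_index =>
      let col_lines := slines.getD col_index []      -- index always in range (col_index < ncols)
      let cell := if row_index < heights.getD col_index 0 then col_lines.getD row_index [] else []
      pvLjust cell (widths.getD col_index 0))))
  String.ofList (PySem.Chars.join ['\n'] lines)

-- ===== PORT B =====
-- block(s): lines padded to the block's width, plus the blank filler cell ' '*w
def pvBlock (s : String) : List (List Char) × List Char :=
  let ls := (PySem.Str.splitlines s).map String.toList
  let w := (ls.map (·.length)).foldl max 0
  (ls.map (fun l => pvLjust l w), List.replicate w ' ')

-- one step of the loop body: append this block's cell to every accumulated row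
-- (rows are lists of cells), then start the rows this block adds below them;
-- 'ls[i] if i < len(ls) else b' = getD; range(len(rows), len(ls)) = List.range'
def pvCombine (st : List (List (List Char)) × List (List Char))
    (b : List (List Char) × List Char) : List (List (List Char)) × List (List Char) :=
  let rows := st.1.mapIdx (fun i r => r ++ [b.1.getD i b.2])
  let extra := (List.range' st.1.length (b.1.length - st.1.length)).map
    (fun i => st.2 ++ [b.1.getD i b.2])   -- ls[i] is in range here; getD is exact
  (rows ++ extra, st.2 ++ [b.2])

def hjoin_alt (strings : List String) (sep : String) : String :=
  match strings with
  | [] => ""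
  | s :: rest =>
    let first := pvBlock s
    let init : List (List (List Char)) × List (List Char) := (first.1.map (fun l => [l]), [first.2])
    let st := rest.foldl (fun st t => pvCombine st (pvBlock t)) init
    String.ofList (PySem.Chars.join ['\n'] (st.1.map (fun r => PySem.Chars.join sep.toList r)))

-- ===== PRECONDITION & SPEC =====
def Spec_hjoin (strings : List String) (sep : String) (out : String) : Prop := out = hjoin_alt strings sep
instance (strings : List String) (sep : String) (out : String) : Decidable (Spec_hjoin strings sep out) := by unfold Spec_hjoin; infer_instance

-- ===== CLAIM =====
def Claim_equal_hjoin : Prop := ∀ (strings : List String) (sep : String), Dom_hjoin strings sep → Spec_hjoin strings sep (hjoin strings sep)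

-- ===== LEMMAS AND PROOFS =====

-- abbreviations for the proof (not used by the ports)
def pvLines (s : String) : List (List Char) := (PySem.Str.splitlines s).map String.toList
def pvWid (s : String) : Nat := ((pvLines s).map (·.length)).foldl max 0
def pvBlank (s : String) : List Char := List.replicate (pvWid s) ' '
def pvCell (s : String) (i : Nat) : List Char :=
  ((pvLines s).map (fun l => pvLjust l (pvWid s))).getD i (pvBlank s)
def pvH (p : List String) : Nat := (p.map (fun s => (pvLines s).length)).foldl max 0
def pvRowsL (p : List String) : List (List (List Char)) :=
  (List.range (pvH p)).map (fun i => p.map (fun t => pvCell t i))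

theorem pv_le_foldl_max (l : List Nat) (a : Nat) : a ≤ l.foldl max a := by
  induction l generalizing a with
  | nil => exact le_rfl
  | cons x xs ih => exact le_trans (Nat.le_max_left a x) (ih _)

theorem pv_mem_le_foldl_max (l : List Nat) (a x : Nat) (hx : x ∈ l) : x ≤ l.foldl max a := by
  induction l generalizing a with
  | nil => cases hx
  | cons y ys ih =>
    rcases List.mem_cons.mp hx with h | h
    · subst h; exact le_trans (Nat.le_max_right a x) (pv_le_foldl_max ys _)
    · exact ih _ h

-- beyond its height, a cell is the blank filler
theorem pv_cell_hi (s : String) (i : Nat) (h : (pvLines s).length ≤ i) :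
    pvCell s i = pvBlank s := by
  unfold pvCell
  rw [List.getD_eq_default]
  simpa using h

-- beyond the max height, a whole row of cells is the row of blanks
theorem pv_row_hi (p : List String) (i : Nat) (h : pvH p ≤ i) :
    p.map (fun t => pvCell t i) = p.map pvBlank := by
  apply List.map_congr_left
  intro t ht
  exact pv_cell_hi t i (le_trans (pv_mem_le_foldl_max _ 0 _ (List.mem_map.mpr ⟨t, ht, rfl⟩)) h)

-- pvBlock in terms of the proof abbreviations
theorem pv_block_eq (s : String) :
    pvBlock s = ((pvLines s).map (fun l => pvLjust l (pvWid s)), pvBlank s) := rfl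

-- the initial state is the correct state for the singleton list
theorem pv_state_base (s : String) :
    (((pvBlock s).1.map (fun l => [l]) : List (List (List Char))), [(pvBlock s).2])
      = (pvRowsL [s], [s].map pvBlank) := by
  rw [pv_block_eq]
  refine Prod.ext ?_ (by simp)
  show ((pvLines s).map (fun l => pvLjust l (pvWid s))).map (fun l => [l]) = pvRowsL [s]
  apply List.ext_getElem
  · simp [pvRowsL, pvH]
  · intro i h1 h2
    simp only [pvRowsL, List.getElem_map, List.getElem_range, List.map_cons, List.map_nil]
    rw [pvCell, List.getD_eq_getElem _ _ (by simpa using h1)]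
    simp

-- gluing one more block preserves the state characterisation
theorem pv_state_step (p : List String) (t : String) :
    pvCombine (pvRowsL p, p.map pvBlank) (pvBlock t)
      = (pvRowsL (p ++ [t]), (p ++ [t]).map pvBlank) := by
  unfold pvCombine
  rw [pv_block_eq]
  dsimp only
  refine Prod.ext ?_ (by simp)
  dsimp only
  have hcell : ∀ i, ((pvLines t).map (fun l => pvLjust l (pvWid t))).getD i (pvBlank t) = pvCell t i :=
    fun _ => rfl
  have hHapp : pvH (p ++ [t]) = max (pvH p) (pvLines t).length := by
    simp [pvH, List.map_append]
  apply List.ext_getElem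
  · simp [pvRowsL, hHapp]; omega
  · intro i h1 h2
    have hi : i < pvH (p ++ [t]) := by simpa [pvRowsL] using h2
    simp only [pvRowsL, List.getElem_map, List.getElem_range, List.map_append,
      List.map_cons, List.map_nil]
    by_cases h : i < pvH p
    · rw [List.getElem_append_left (by simpa using h)]
      rw [List.getElem_mapIdx]
      simp [pvCell, List.getD, List.getElem?_map]
    · rw [List.getElem_append_right (by simpa using Nat.le_of_not_lt h)]
      simp only [List.getElem_map, List.getElem_range', List.length_mapIdx,
        List.length_map, List.length_range]
      rw [hcell]
      have hidx : pvH p + 1 * (i - pvH p) = i := by omega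
      rw [hidx, ← pv_row_hi p i (Nat.le_of_not_lt h)]

-- the fold computes the rows of cells and the blank row, for any processed prefix
theorem pv_state (s : String) (rest : List String) :
    rest.foldl (fun st t => pvCombine st (pvBlock t))
        ((pvBlock s).1.map (fun l => [l]), [(pvBlock s).2])
      = (pvRowsL (s :: rest), (s :: rest).map pvBlank) := by
  induction rest using List.reverseRecOn with
  | nil => exact pv_state_base s
  | append_singleton rest t ih =>
    rw [List.foldl_append, List.foldl_cons, List.foldl_nil, ih,
        show s :: (rest ++ [t]) = (s :: rest) ++ [t] by simp,
        pv_state_step (s :: rest) t]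

-- getD through a map at an in-range index
theorem pv_getD_map {α β : Type} (f : α → β) (xs : List α) (c : Nat) (d : β) (hc : c < xs.length) :
    (xs.map f).getD c d = f xs[c] := by
  rw [List.getD_eq_getElem _ _ (by simpa using hc), List.getElem_map]

-- A's heights list is the per-string line count list
theorem pv_heights_eq (strings : List String) :
    (List.map string_shape strings).map (·.1) = strings.map (fun s => (pvLines s).length) := by
  rw [List.map_map]
  apply List.map_congr_left
  intro s _
  simp [string_shape, pvLines, PySem.Str.splitlines]

-- A's per-row inner loop over column indices equals the map of pvCell over the strings
theorem pv_row_eq (strings : List String) (r : Nat) :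
    (List.range strings.length).map (fun c =>
        pvLjust
          (if r < ((strings.map string_shape).map (·.1)).getD c 0
           then ((strings.map (fun s => (PySem.Str.splitlines s).map String.toList)).getD c []).getD r []
           else [])
          (((strings.map string_shape).map (·.2)).getD c 0))
      = strings.map (fun t => pvCell t r) := by
  apply List.ext_getElem (by simp)
  intro c h1 h2
  have hc : c < strings.length := by simpa using h2
  simp only [List.getElem_map, List.getElem_range]
  rw [pv_heights_eq, pv_getD_map _ _ _ _ (by simpa using hc),
      pv_getD_map _ _ _ _ (by simpa using hc)]
  have hw : ((strings.map string_shape).map (·.2)).getD c 0 = pvWid strings[c] := by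
    rw [List.map_map, pv_getD_map _ _ _ _ (by simpa using hc)]
    simp only [Function.comp_apply, string_shape, pvWid, pvLines, List.map_map]
    rfl
  rw [hw]
  show pvLjust _ _ = pvCell strings[c] r
  unfold pvCell
  by_cases h : r < (pvLines strings[c]).length
  · rw [if_pos (by simpa [pvLines] using h),
        List.getD_eq_getElem _ _ (by simpa [pvLines] using h)]
    rw [List.getD_eq_getElem _ _ (by simpa [pvLines] using h)]
    simp [pvLines]
  · rw [if_neg (by simpa [pvLines] using h),
        List.getD_eq_default _ _ (by simpa using Nat.le_of_not_lt h)]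
    simp [pvLjust, pvBlank]

theorem hjoin_spec : Claim_equal_hjoin := by
  intro strings sep _
  unfold Spec_hjoin hjoin hjoin_alt
  cases strings with
  | nil => rfl
  | cons s rest =>
    simp only [if_neg (by simp : ¬ (s :: rest = []))]
    rw [pv_state]
    congr 1
    congr 1
    have hh : ((s :: rest).map string_shape).map (·.1) = (s :: rest).map (fun t => (pvLines t).length) :=
      pv_heights_eq _
    rw [hh]
    show (List.range (pvH (s :: rest))).map _
        = (pvRowsL (s :: rest)).map (fun r => PySem.Chars.join sep.toList r)
    unfold pvRowsL
    conv_rhs => rw [List.map_map]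
    apply List.map_congr_left
    intro r _
    simp only [Function.comp_apply]
    congr 1
    have := pv_row_eq (s :: rest) r
    rw [hh] at this
    exact this
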